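-- pv_equiv track=rewrite | github.com/juyongc/Up-Algorithms | PROG_모두0으로만들기.py | solution
-- ===== SOURCE A (Python) =====
-- from collections import deque
--
-- def find_level(nodes):
--     visit = [0]*len(nodes)
--     q = deque()     # 방문할 노드
--     stack = []      # 연결된 부모-자식 노드
--     q.append(0)
--     visit[0] = 1
--     while q:
--         now = q.popleft()
--         for node in nodes[now]:
--             if visit[node] == 0:
--                 q.append(node)
--                 stack.append((now,node))
--                 visit[node] = 1
--
--     return stack
--
-- def solution(a, edges):
--     answer = 0
--     nodes = [[] for _ in range(len(a))]
--     # 각 노드별 연결된 노드 구하기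
--     for u,v in edges:
--         nodes[u].append(v)
--         nodes[v].append(u)
--
--     order = find_level(nodes)
--     cnt = 0
--     # 찾은 부모-자식 노드에서 자식에서 부모로 값 옮기기
--     # 음수값도 있으니 abs로 양수값으로 만들어서 더하기
--     while order:
--         u,v = order.pop()
--         a[u] += a[v]
--         cnt += abs(a[v])
--         a[v] = 0
--     answer = cnt
--     # 불가능한 경우 찾기
--     for zero in a:
--         if zero != 0:
--             answer = -1
--             break
--     return answer
-- ===== SOURCE B (Python) =====
-- def solution(a, edges):
--     # Same BFS discovery (A's value on cyclic inputs depends on the BFS tree),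
--     # but instead of transferring values child-to-parent in a bottom-up pass,
--     # every node's value is routed independently up its ancestor chain, so
--     # acc[v] becomes the subtree sum of v directly; `a` is NOT mutated (A
--     # mutates it; only the return value is reproduced).
--     n = len(a)
--     adj = [[] for _ in range(n)]
--     for u, v in edges:
--         adj[u].append(v)
--         adj[v].append(u)
--     seen = [False] * n
--     parent = [0] * n
--     seen[0] = True
--     order = [0]
--     i = 0
--     while i < len(order):
--         u = order[i]
--         i += 1
--         for w in adj[u]:
--             if not seen[w]:
--                 seen[w] = True
--                 parent[w] = u
--                 order.append(w)
--     acc = [0] * n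
--     for w in order:
--         x = w
--         acc[x] += a[w]
--         while x != 0:
--             x = parent[x]
--             acc[x] += a[w]
--     if acc[0] != 0 or any(a[x] != 0 for x in range(n) if not seen[x]):
--         return -1
--     return sum(abs(acc[v]) for v in order[1:])
-- ===== Notes on version B (the rewrite author's own statement) =====
-- stated objective: alternative
-- what changed: A's bottom-up pass that pops a BFS-collected (parent,child) edge stack and transfers each child's accumulated value into its parent on the mutated argument list is replaced by routing every node's value independently up its ancestor chain via parent-pointer climbs into a fresh accumulator, so each subtree sum is obtained directly with no child-to-parent transfer pass and `a` is not mutated; BFS discovery itself is kept because A's result on cyclic inputs depends on the BFS tree.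
import Mathlib
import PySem

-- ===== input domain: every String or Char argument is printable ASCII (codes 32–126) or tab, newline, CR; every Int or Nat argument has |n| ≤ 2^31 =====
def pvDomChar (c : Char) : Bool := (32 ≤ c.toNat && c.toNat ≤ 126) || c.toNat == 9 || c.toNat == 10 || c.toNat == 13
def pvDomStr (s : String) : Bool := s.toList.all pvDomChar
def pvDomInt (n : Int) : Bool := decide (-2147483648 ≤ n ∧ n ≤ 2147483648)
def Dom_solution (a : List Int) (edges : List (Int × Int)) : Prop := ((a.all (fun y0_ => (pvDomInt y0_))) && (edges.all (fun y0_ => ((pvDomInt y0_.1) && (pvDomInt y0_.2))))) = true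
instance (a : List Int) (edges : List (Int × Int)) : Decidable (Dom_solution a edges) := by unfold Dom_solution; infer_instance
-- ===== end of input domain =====

-- B keeps A's BFS discovery (A's value on cyclic inputs depends on the BFS tree) but
-- replaces the bottom-up child-to-parent transfer pass over the popped edge stack by
-- independent parent-pointer climbs: every node's value is routed up its ancestor
-- chain into a fresh accumulator, yielding each subtree sum directly.  A mutates the
-- argument list `a`; B does not — the equivalence proved here is about the RETURN value.

-- Python list index resolution: negative indices count from the end (both Pythons
-- index lists with possibly negative node labels; Pre_ keeps every access in range).
def pvNorm (n : Nat) (i : Int) : Nat := (if i < 0 then i + n else i).toNat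

-- ===== PORT A =====
-- nodes[i].append(x)  (exact when pvNorm n i < n, which Pre_ guarantees)
def pvAppendAt (n : Nat) (ls : List (List Int)) (i x : Int) : List (List Int) :=
  ls.set (pvNorm n i) (ls.getD (pvNorm n i) [] ++ [x])

-- body of `for node in nodes[now]:` — state (visit, q, stack)
def pvInnerA (n : Nat) (now : Int) (acc : List Int × List Int × List (Int × Int))
    (node : Int) : List Int × List Int × List (Int × Int) :=
  if acc.1.getD (pvNorm n node) 0 = 0 then
    (acc.1.set (pvNorm n node) 1, acc.2.1 ++ [node], acc.2.2 ++ [(now, node)])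
  else acc

-- the `while q:` loop of find_level; fuel n bounds the number of pops (each
-- enqueue marks a fresh index visited, so at most n nodes are ever enqueued)
def pvBfsA (nodes : List (List Int)) (n : Nat) :
    Nat → List Int → List Int → List (Int × Int) → List (Int × Int)
  | 0, _, _, stack => stack
  | fuel + 1, visit, q, stack =>
    match q with
    | [] => stack
    | now :: q' =>
      let st := (nodes.getD (pvNorm n now) []).foldl (pvInnerA n now) (visit, q', stack)
      pvBfsA nodes n fuel st.1 st.2.1 st.2.2

def pvFindLevel (nodes : List (List Int)) : List (Int × Int) :=
  let n := nodes.length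
  pvBfsA nodes n n ((List.replicate n (0 : Int)).set 0 1) [0] []

-- u,v = order.pop(); a[u] += a[v]; cnt += abs(a[v]); a[v] = 0
def pvPayA (n : Nat) (acc : List Int × Int) (p : Int × Int) : List Int × Int :=
  let a1 := acc.1.set (pvNorm n p.1) (acc.1.getD (pvNorm n p.1) 0 + acc.1.getD (pvNorm n p.2) 0)
  let av := a1.getD (pvNorm n p.2) 0
  (a1.set (pvNorm n p.2) 0, acc.2 + |av|)

def solution (a : List Int) (edges : List (Int × Int)) : Int :=
  let n := a.length
  let nodes := edges.foldl (fun ls e => pvAppendAt n (pvAppendAt n ls e.1 e.2) e.2 e.1)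
    (List.replicate n ([] : List Int))
  let order := pvFindLevel nodes
  let st := order.reverse.foldl (pvPayA n) (a, 0)
  -- for zero in a: if zero != 0: answer = -1; break
  if st.1.any (fun z => z ≠ 0) then -1 else st.2

-- ===== PORT B =====
-- adj[u].append(v); adj[v].append(u), as structural recursion on edges
def pvBuildAdj (n : Nat) (adj : List (List Int)) : List (Int × Int) → List (List Int)
  | [] => adj
  | (u, v) :: rest => pvBuildAdj n (pvAppendAt n (pvAppendAt n adj u v) v u) rest

-- body of `for w in adj[u]:` — state (seen, parent, order)
def pvInnerB (n : Nat) (u : Int) (acc : List Bool × List Int × List Int)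
    (w : Int) : List Bool × List Int × List Int :=
  if acc.1.getD (pvNorm n w) false = false then
    (acc.1.set (pvNorm n w) true, acc.2.1.set (pvNorm n w) u, acc.2.2 ++ [w])
  else acc

-- the cursor loop `while i < len(order):`; fuel n bounds the number of cursor steps
def pvBfsB (adj : List (List Int)) (n : Nat) :
    Nat → List Bool → List Int → List Int → Nat → List Bool × List Int × List Int
  | 0, seen, parent, order, _ => (seen, parent, order)
  | fuel + 1, seen, parent, order, i =>
    if i < order.length then
      let u := order.getD i 0
      let st := (adj.getD (pvNorm n u) []).foldl (pvInnerB n u) (seen, parent, order)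
      pvBfsB adj n fuel st.1 st.2.1 st.2.2 (i + 1)
    else (seen, parent, order)

-- `while x != 0: x = parent[x]; acc[x] += a[w]` — fuel n bounds the climb (the
-- parent chain strictly descends the discovery order, so it has at most n steps)
def pvClimbLoop (n : Nat) (parent : List Int) (aw : Int) :
    Nat → Int → List Int → List Int
  | 0, _, acc => acc
  | fuel + 1, x, acc =>
    if x = 0 then acc
    else
      let x' := parent.getD (pvNorm n x) 0
      pvClimbLoop n parent aw fuel x' (acc.set (pvNorm n x') (acc.getD (pvNorm n x') 0 + aw))

def solution_alt (a : List Int) (edges : List (Int × Int)) : Int :=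
  let n := a.length
  let adj := pvBuildAdj n (List.replicate n ([] : List Int)) edges
  let bfs := pvBfsB adj n n ((List.replicate n false).set 0 true) (List.replicate n (0 : Int)) [0] 0
  let seen := bfs.1
  let parent := bfs.2.1
  let order := bfs.2.2
  -- for w in order: x = w; acc[x] += a[w]; while x != 0: x = parent[x]; acc[x] += a[w]
  let acc := order.foldl (fun acc w =>
      pvClimbLoop n parent (a.getD (pvNorm n w) 0) n w
        (acc.set (pvNorm n w) (acc.getD (pvNorm n w) 0 + a.getD (pvNorm n w) 0)))
    (List.replicate n (0 : Int))
  -- if acc[0] != 0 or any(a[x] != 0 for x in range(n) if not seen[x]): return -1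
  if acc.getD 0 0 ≠ 0 ∨ (PySem.List.pyRange 0 n 1).any
      (fun x => !(seen.getD (pvNorm n x) false) && decide (a.getD (pvNorm n x) 0 ≠ 0)) = true
  then -1
  -- return sum(abs(acc[v]) for v in order[1:])
  else (PySem.List.slice order (some 1) none).foldl
    (fun t v => t + |acc.getD (pvNorm n v) 0|) 0

-- ===== PRECONDITION & SPEC =====
-- Pre_ excludes exactly the inputs on which the Python A raises IndexError:
-- an empty `a` (visit[0] = 1) and edges naming a node outside [-len(a), len(a)).
def Pre_solution (a : List Int) (edges : List (Int × Int)) : Prop :=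
  a ≠ [] ∧ ∀ e ∈ edges, -(a.length : Int) ≤ e.1 ∧ e.1 < a.length ∧
    -(a.length : Int) ≤ e.2 ∧ e.2 < a.length
instance (a : List Int) (edges : List (Int × Int)) : Decidable (Pre_solution a edges) := by
  unfold Pre_solution; infer_instance

def pvWitness_solution : List Int × (List (Int × Int)) := ([4, -2, -2], [(0, 1), (2, 0)])

def Spec_solution (a : List Int) (edges : List (Int × Int)) (out : Int) : Prop := out = solution_alt a edges
instance (a : List Int) (edges : List (Int × Int)) (out : Int) : Decidable (Spec_solution a edges out) := by unfold Spec_solution; infer_instance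

-- ===== CLAIM (what is proved, stated in full; the proofs are below) =====
def Claim_equal_solution : Prop := ∀ (a : List Int) (edges : List (Int × Int)), Dom_solution a edges → Pre_solution a edges → Spec_solution a edges (solution a edges)

-- ===== LEMMAS AND PROOFS =====

-- proof-side: visit entries of A are exactly B's seen booleans as 0/1
def pvB2I (b : Bool) : Int := if b then 1 else 0

theorem pvNorm_lt (n : Nat) (i : Int) (h1 : -(n : Int) ≤ i) (h2 : i < n) : pvNorm n i < n := by
  unfold pvNorm; split <;> omega

theorem pvNorm_zero (n : Nat) : pvNorm n 0 = 0 := by simp [pvNorm]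

theorem pv_getD_set_self {α : Type} (l : List α) (k : Nat) (x d : α) (h : k < l.length) :
    (l.set k x).getD k d = x := by
  simp [List.getD_eq_getElem?_getD, h]

theorem pv_getD_set_ne {α : Type} (l : List α) (j k : Nat) (x d : α) (h : j ≠ k) :
    (l.set k x).getD j d = l.getD j d := by
  simp [List.getD_eq_getElem?_getD, List.getElem?_set_ne (Ne.symm h)]

theorem pv_getD_append_left {α : Type} (l l' : List α) (i : Nat) (d : α) (h : i < l.length) :
    (l ++ l').getD i d = l.getD i d := by
  simp [List.getD_eq_getElem?_getD, List.getElem?_append_left h]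

theorem pv_getD_map_b2i (l : List Bool) (k : Nat) :
    (l.map pvB2I).getD k 0 = pvB2I (l.getD k false) := by
  cases h : l[k]? <;>
    simp [List.getD_eq_getElem?_getD, List.getElem?_map, h, pvB2I]

theorem pv_appendAt_length (n : Nat) (ls : List (List Int)) (i x : Int) :
    (pvAppendAt n ls i x).length = ls.length := by
  simp [pvAppendAt]

theorem pv_adjFold_length (n : Nat) (edges : List (Int × Int)) :
    ∀ ls : List (List Int),
      (edges.foldl (fun ls e => pvAppendAt n (pvAppendAt n ls e.1 e.2) e.2 e.1) ls).length
        = ls.length := by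
  induction edges with
  | nil => intro ls; rfl
  | cons e rest ih => intro ls; rw [List.foldl_cons, ih]; simp [pv_appendAt_length]

theorem pv_buildAdj_eq (n : Nat) (edges : List (Int × Int)) :
    ∀ ls, pvBuildAdj n ls edges
      = edges.foldl (fun ls e => pvAppendAt n (pvAppendAt n ls e.1 e.2) e.2 e.1) ls := by
  induction edges with
  | nil => intro ls; rfl
  | cons e rest ih => intro ls; cases e; rw [List.foldl_cons]; exact ih _

theorem pv_appendAt_inv (n : Nat) (ls : List (List Int)) (i y : Int)
    (h : ∀ l ∈ ls, ∀ x ∈ l, pvNorm n x < n) (hy : pvNorm n y < n) :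
    ∀ l ∈ pvAppendAt n ls i y, ∀ x ∈ l, pvNorm n x < n := by
  intro l hl x hx
  rcases List.mem_or_eq_of_mem_set hl with h1 | h2
  · exact h l h1 x hx
  · subst h2
    rcases List.mem_append.mp hx with h3 | h3
    · by_cases hlt : pvNorm n i < ls.length
      · rw [List.getD_eq_getElem _ _ hlt] at h3
        exact h _ (List.getElem_mem hlt) x h3
      · rw [List.getD_eq_default _ _ (le_of_not_gt hlt)] at h3
        cases h3
    · rcases List.mem_singleton.mp h3 with rfl
      exact hy

theorem pv_adjFold_inv (n : Nat) (edges : List (Int × Int))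
    (he : ∀ e ∈ edges, pvNorm n e.1 < n ∧ pvNorm n e.2 < n) :
    ∀ ls, (∀ l ∈ ls, ∀ x ∈ l, pvNorm n x < n) →
      ∀ l ∈ edges.foldl (fun ls e => pvAppendAt n (pvAppendAt n ls e.1 e.2) e.2 e.1) ls,
        ∀ x ∈ l, pvNorm n x < n := by
  induction edges with
  | nil => intro ls h; exact h
  | cons e rest ih =>
    intro ls h
    rw [List.foldl_cons]
    refine ih (fun e' he' => he e' (List.mem_cons_of_mem _ he')) _ ?_
    have h1 := he e (List.mem_cons_self)
    exact pv_appendAt_inv n _ e.2 e.1 (pv_appendAt_inv n ls e.1 e.2 h h1.2) h1.1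

-- the coupled inner loops: A's (visit, q, stack) tracks B's (seen, parent, order)
theorem pv_inner_couple (n : Nat) (now : Int) :
    ∀ (lst : List Int) (seen : List Bool) (parent order : List Int) (i : Nat),
      (∀ x ∈ lst, pvNorm n x < n) →
      seen.length = n → parent.length = n → i < order.length →
      (∀ v ∈ order, pvNorm n v < n ∧ seen.getD (pvNorm n v) false = true) →
      (lst.foldl (pvInnerA n now) (seen.map pvB2I, order.drop (i + 1),
          (order.drop 1).map (fun v => (parent.getD (pvNorm n v) 0, v)))
        = ((lst.foldl (pvInnerB n now) (seen, parent, order)).1.map pvB2I,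
           (lst.foldl (pvInnerB n now) (seen, parent, order)).2.2.drop (i + 1),
           ((lst.foldl (pvInnerB n now) (seen, parent, order)).2.2.drop 1).map
             (fun v => ((lst.foldl (pvInnerB n now) (seen, parent, order)).2.1.getD (pvNorm n v) 0, v))))
      ∧ (lst.foldl (pvInnerB n now) (seen, parent, order)).1.length = n
      ∧ (lst.foldl (pvInnerB n now) (seen, parent, order)).2.1.length = n
      ∧ order.length ≤ (lst.foldl (pvInnerB n now) (seen, parent, order)).2.2.length
      ∧ (∀ v ∈ (lst.foldl (pvInnerB n now) (seen, parent, order)).2.2,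
          pvNorm n v < n ∧ (lst.foldl (pvInnerB n now) (seen, parent, order)).1.getD (pvNorm n v) false = true) := by
  intro lst
  induction lst with
  | nil =>
    intro seen parent order i _ hs hp hi hinv
    exact ⟨rfl, hs, hp, le_refl _, hinv⟩
  | cons x rest ih =>
    intro seen parent order i hlst hs hp hi hinv
    have hx : pvNorm n x < n := hlst x List.mem_cons_self
    have hrest : ∀ y ∈ rest, pvNorm n y < n := fun y hy => hlst y (List.mem_cons_of_mem _ hy)
    rw [List.foldl_cons, List.foldl_cons]
    by_cases hseen : seen.getD (pvNorm n x) false = false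
    · -- unvisited: both sides take the `if` branch
      have hA : pvInnerA n now (seen.map pvB2I, order.drop (i + 1),
          (order.drop 1).map (fun v => (parent.getD (pvNorm n v) 0, v))) x
        = ((seen.set (pvNorm n x) true).map pvB2I,
           (order ++ [x]).drop (i + 1),
           ((order ++ [x]).drop 1).map
             (fun v => ((parent.set (pvNorm n x) now).getD (pvNorm n v) 0, v))) := by
        have hcond : (seen.map pvB2I).getD (pvNorm n x) 0 = 0 := by
          rw [pv_getD_map_b2i, hseen]; rfl
        have hne : ∀ v ∈ order, pvNorm n v ≠ pvNorm n x := by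
          intro v hv heq
          have := (hinv v hv).2
          rw [heq, hseen] at this; cases this
        simp only [pvInnerA, hcond]
        refine Prod.ext ?_ (Prod.ext ?_ ?_)
        · show (seen.map pvB2I).set (pvNorm n x) 1 = (seen.set (pvNorm n x) true).map pvB2I
          rw [List.map_set]; rfl
        · show order.drop (i + 1) ++ [x] = (order ++ [x]).drop (i + 1)
          rw [List.drop_append_of_le_length (by omega)]
        · show (order.drop 1).map (fun v => (parent.getD (pvNorm n v) 0, v)) ++ [(now, x)]
            = ((order ++ [x]).drop 1).map
                (fun v => ((parent.set (pvNorm n x) now).getD (pvNorm n v) 0, v))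
          rw [List.drop_append_of_le_length (by omega), List.map_append]
          congr 1
          · apply List.map_congr_left
            intro v hv
            rw [pv_getD_set_ne _ _ _ _ _ (hne v (List.mem_of_mem_drop hv))]
          · simp only [List.map_cons, List.map_nil]
            rw [pv_getD_set_self parent (pvNorm n x) now 0 (by rw [hp]; exact hx)]
      have hB : pvInnerB n now (seen, parent, order) x
          = (seen.set (pvNorm n x) true, parent.set (pvNorm n x) now, order ++ [x]) := by
        simp only [pvInnerB, hseen]
        rfl
      rw [hA, hB]
      have hinv' : ∀ v ∈ order ++ [x], pvNorm n v < n ∧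
          (seen.set (pvNorm n x) true).getD (pvNorm n v) false = true := by
        intro v hv
        rcases List.mem_append.mp hv with h1 | h1
        · have hne : pvNorm n v ≠ pvNorm n x := by
            intro heq
            have := (hinv v h1).2
            rw [heq, hseen] at this; cases this
          exact ⟨(hinv v h1).1, by rw [pv_getD_set_ne _ _ _ _ _ hne]; exact (hinv v h1).2⟩
        · rcases List.mem_singleton.mp h1 with rfl
          exact ⟨hx, pv_getD_set_self _ _ _ _ (hs ▸ hx)⟩
      have := ih (seen.set (pvNorm n x) true) (parent.set (pvNorm n x) now) (order ++ [x]) i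
        hrest (by simpa using hs) (by simpa using hp)
        (by simp; omega) hinv'
      refine ⟨this.1, this.2.1, this.2.2.1, ?_, this.2.2.2.2⟩
      calc order.length ≤ (order ++ [x]).length := by simp
        _ ≤ _ := this.2.2.2.1
    · -- already seen: both sides skip
      have hseen' : seen.getD (pvNorm n x) false = true := by
        cases h : seen.getD (pvNorm n x) false
        · exact absurd h hseen
        · rfl
      have hA : pvInnerA n now (seen.map pvB2I, order.drop (i + 1),
          (order.drop 1).map (fun v => (parent.getD (pvNorm n v) 0, v))) x
        = (seen.map pvB2I, order.drop (i + 1),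
           (order.drop 1).map (fun v => (parent.getD (pvNorm n v) 0, v))) := by
        have hcond : (seen.map pvB2I).getD (pvNorm n x) 0 = 1 := by
          rw [pv_getD_map_b2i, hseen']; rfl
        simp only [pvInnerA, hcond]
        norm_num
      have hB : pvInnerB n now (seen, parent, order) x = (seen, parent, order) := by
        simp only [pvInnerB, hseen']
        norm_num
      rw [hA, hB]
      exact ih seen parent order i hrest hs hp hi hinv

-- the coupled BFS loops, one fuel step at a time
theorem pv_bfs_couple (nodes : List (List Int)) (n : Nat)
    (hadj : ∀ l ∈ nodes, ∀ x ∈ l, pvNorm n x < n) :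
    ∀ (fuel : Nat) (seen : List Bool) (parent order : List Int) (i : Nat),
      seen.length = n → parent.length = n →
      (∀ v ∈ order, pvNorm n v < n ∧ seen.getD (pvNorm n v) false = true) →
      pvBfsA nodes n fuel (seen.map pvB2I) (order.drop i)
          ((order.drop 1).map (fun v => (parent.getD (pvNorm n v) 0, v)))
        = ((pvBfsB nodes n fuel seen parent order i).2.2.drop 1).map
            (fun v => ((pvBfsB nodes n fuel seen parent order i).2.1.getD (pvNorm n v) 0, v)) := by
  intro fuel
  induction fuel with
  | zero => intro seen parent order i _ _ _; rfl
  | succ fuel ih =>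
    intro seen parent order i hs hp hinv
    by_cases hi : i < order.length
    · have hdrop : order.drop i = order[i] :: order.drop (i + 1) :=
        List.drop_eq_getElem_cons hi
      have hu : order.getD i 0 = order[i] := List.getD_eq_getElem order 0 hi
      have hlst : ∀ x ∈ nodes.getD (pvNorm n order[i]) [], pvNorm n x < n := by
        intro x hxm
        by_cases hlt : pvNorm n order[i] < nodes.length
        · rw [List.getD_eq_getElem _ _ hlt] at hxm
          exact hadj _ (List.getElem_mem hlt) x hxm
        · rw [List.getD_eq_default _ _ (le_of_not_gt hlt)] at hxm
          cases hxm
      obtain ⟨hc, hs', hp', _, hinv'⟩ :=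
        pv_inner_couple n order[i] (nodes.getD (pvNorm n order[i]) [])
          seen parent order i hlst hs hp hi hinv
      rw [hdrop]
      show pvBfsA nodes n (fuel + 1) (seen.map pvB2I)
          (order[i] :: order.drop (i + 1)) _ = _
      rw [pvBfsA, pvBfsB]
      simp only [if_pos hi, hu]
      rw [hc]
      exact ih _ _ _ (i + 1) hs' hp' hinv'
    · have hdrop : order.drop i = [] := List.drop_eq_nil_of_le (le_of_not_gt hi)
      rw [hdrop, pvBfsA, pvBfsB]
      simp only [if_neg hi]

-- ---- BFS structural invariants used by the phase-2 equivalence ----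
def pvInv (n : Nat) (seen : List Bool) (parent : List Int) (order : List Int) : Prop :=
  (order.map (pvNorm n)).Nodup ∧
  (∀ ix, ix < n → (seen.getD ix false = true ↔ ix ∈ order.map (pvNorm n))) ∧
  (∀ j, j + 1 < order.length → ∃ i, i ≤ j ∧
      order.getD i 0 = parent.getD (pvNorm n (order.getD (j+1) 0)) 0) ∧
  (∀ v ∈ order, pvNorm n v < n)

theorem pv_inner_inv (n : Nat) (now : Int) (inow : Nat) :
    ∀ (lst : List Int) (seen : List Bool) (parent order : List Int),
      (∀ x ∈ lst, pvNorm n x < n) →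
      seen.length = n → parent.length = n →
      inow < order.length → order.getD inow 0 = now →
      pvInv n seen parent order →
      pvInv n (lst.foldl (pvInnerB n now) (seen, parent, order)).1
            (lst.foldl (pvInnerB n now) (seen, parent, order)).2.1
            (lst.foldl (pvInnerB n now) (seen, parent, order)).2.2
      ∧ (lst.foldl (pvInnerB n now) (seen, parent, order)).1.length = n
      ∧ (lst.foldl (pvInnerB n now) (seen, parent, order)).2.1.length = n
      ∧ ∃ k, (lst.foldl (pvInnerB n now) (seen, parent, order)).2.2 = order ++ k := by
  intro lst
  induction lst with
  | nil =>
    intro seen parent order _ hs hp _ _ hInv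
    exact ⟨hInv, hs, hp, [], by simp⟩
  | cons x rest ih =>
    intro seen parent order hlst hs hp hinow hnoweq hInv
    obtain ⟨hnd, hmem, hpar, hbnd⟩ := hInv
    have hx : pvNorm n x < n := hlst x List.mem_cons_self
    have hrest : ∀ y ∈ rest, pvNorm n y < n := fun y hy => hlst y (List.mem_cons_of_mem _ hy)
    rw [List.foldl_cons]
    by_cases hseen : seen.getD (pvNorm n x) false = false
    · have hB : pvInnerB n now (seen, parent, order) x
          = (seen.set (pvNorm n x) true, parent.set (pvNorm n x) now, order ++ [x]) := by
        simp only [pvInnerB, hseen]; rfl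
      rw [hB]
      have hnotmem : pvNorm n x ∉ order.map (pvNorm n) := by
        intro hm
        have := (hmem (pvNorm n x) hx).mpr hm
        rw [hseen] at this; cases this
      have hInv' : pvInv n (seen.set (pvNorm n x) true) (parent.set (pvNorm n x) now)
          (order ++ [x]) := by
        refine ⟨?_, ?_, ?_, ?_⟩
        · rw [List.map_append]
          simp only [List.map_cons, List.map_nil]
          rw [List.nodup_append]
          exact ⟨hnd, List.nodup_singleton _, by simpa using hnotmem⟩
        · intro ix hixn
          by_cases hix : ix = pvNorm n x
          · subst hix
            rw [pv_getD_set_self seen (pvNorm n x) true false (by omega)]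
            simp
          · rw [pv_getD_set_ne seen ix (pvNorm n x) true false hix]
            rw [List.map_append]
            simp only [List.map_cons, List.map_nil]
            rw [List.mem_append]
            constructor
            · intro h; exact Or.inl ((hmem ix hixn).mp h)
            · intro h
              rcases h with h | h
              · exact (hmem ix hixn).mpr h
              · exact absurd (List.mem_singleton.mp h) hix
        · intro j hj
          rw [List.length_append, List.length_singleton] at hj
          by_cases hjlt : j + 1 < order.length
          · obtain ⟨i, hi, hieq⟩ := hpar j hjlt
            refine ⟨i, hi, ?_⟩
            rw [pv_getD_append_left order [x] i 0 (by omega),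
                pv_getD_append_left order [x] (j+1) 0 hjlt]
            have helem : order.getD (j+1) 0 ∈ order := by
              rw [List.getD_eq_getElem order 0 hjlt]
              exact List.getElem_mem hjlt
            have : pvNorm n (order.getD (j+1) 0) ≠ pvNorm n x := by
              intro heq
              exact hnotmem (heq ▸ List.mem_map_of_mem helem)
            rw [pv_getD_set_ne parent _ _ now 0 this]
            exact hieq
          · have hj1 : j + 1 = order.length := by omega
            refine ⟨inow, by omega, ?_⟩
            have hgx : (order ++ [x]).getD (j+1) 0 = x := by
              rw [hj1]
              simp [List.getD_eq_getElem?_getD, List.getElem?_append_right (le_refl order.length)]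
            rw [hgx, pv_getD_set_self parent (pvNorm n x) now 0 (by omega),
                pv_getD_append_left order [x] inow 0 hinow]
            exact hnoweq
        · intro v hv
          rcases List.mem_append.mp hv with h | h
          · exact hbnd v h
          · rcases List.mem_singleton.mp h with rfl; exact hx
      have := ih (seen.set (pvNorm n x) true) (parent.set (pvNorm n x) now) (order ++ [x])
        hrest (by simpa using hs) (by simpa using hp)
        (by rw [List.length_append]; omega)
        (by rw [pv_getD_append_left order [x] inow 0 hinow]; exact hnoweq)
        hInv'
      obtain ⟨h1, h2, h3, k, hk⟩ := this
      exact ⟨h1, h2, h3, [x] ++ k, by rw [hk, List.append_assoc]⟩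
    · have hseen' : seen.getD (pvNorm n x) false = true := by
        cases h : seen.getD (pvNorm n x) false
        · exact absurd h hseen
        · rfl
      have hB : pvInnerB n now (seen, parent, order) x = (seen, parent, order) := by
        simp only [pvInnerB, hseen']; norm_num
      rw [hB]
      exact ih seen parent order hrest hs hp hinow hnoweq ⟨hnd, hmem, hpar, hbnd⟩

theorem pv_bfs_inv (adj : List (List Int)) (n : Nat)
    (hadj : ∀ l ∈ adj, ∀ x ∈ l, pvNorm n x < n) :
    ∀ (fuel : Nat) (seen : List Bool) (parent order : List Int) (i : Nat),
      seen.length = n → parent.length = n → pvInv n seen parent order →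
      pvInv n (pvBfsB adj n fuel seen parent order i).1
            (pvBfsB adj n fuel seen parent order i).2.1
            (pvBfsB adj n fuel seen parent order i).2.2
      ∧ ∃ k, (pvBfsB adj n fuel seen parent order i).2.2 = order ++ k := by
  intro fuel
  induction fuel with
  | zero =>
    intro seen parent order i _ _ hInv
    exact ⟨hInv, [], by simp [pvBfsB]⟩
  | succ fuel ih =>
    intro seen parent order i hs hp hInv
    rw [pvBfsB]
    by_cases hi : i < order.length
    · simp only [if_pos hi]
      have hnow : order.getD i 0 ∈ order := by
        rw [List.getD_eq_getElem order 0 hi]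
        exact List.getElem_mem hi
      have hlst : ∀ x ∈ adj.getD (pvNorm n (order.getD i 0)) [], pvNorm n x < n := by
        intro x hxm
        by_cases hlt : pvNorm n (order.getD i 0) < adj.length
        · rw [List.getD_eq_getElem _ _ hlt] at hxm
          exact hadj _ (List.getElem_mem hlt) x hxm
        · rw [List.getD_eq_default _ _ (le_of_not_gt hlt)] at hxm
          cases hxm
      obtain ⟨hInv', hs', hp', k1, hk1⟩ :=
        pv_inner_inv n (order.getD i 0) i (adj.getD (pvNorm n (order.getD i 0)) [])
          seen parent order hlst hs hp hi rfl hInv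
      obtain ⟨h1, k2, hk2⟩ := ih _ _ _ (i+1) hs' hp' hInv'
      exact ⟨h1, k1 ++ k2, by rw [hk2, hk1, List.append_assoc]⟩
    · simp only [if_neg hi]
      exact ⟨hInv, [], by simp⟩

-- ---- abstract tree context extracted from the BFS result ----
structure PvT : Type where
  n : Nat
  qn : List Nat
  Pn : Nat → Nat
  hq : ∃ t, qn = 0 :: t
  nodup : qn.Nodup
  lt : ∀ v ∈ qn, v < n
  step : ∀ v ∈ qn, v ≠ 0 → Pn v ∈ qn ∧ qn.idxOf (Pn v) < qn.idxOf v

def pvPos (c : PvT) (v : Nat) : Nat := c.qn.idxOf v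

-- ancestor chain of v (norm level), computed with explicit fuel
def pvChainF (P : Nat → Nat) : Nat → Nat → List Nat
  | 0, v => [v]
  | f + 1, v => if v = 0 then [v] else v :: pvChainF P f (P v)

def pvNch (c : PvT) (v : Nat) : List Nat := pvChainF c.Pn (pvPos c v) v

theorem pv_pos_zero (c : PvT) : pvPos c 0 = 0 := by
  obtain ⟨t, ht⟩ := c.hq
  simp [pvPos, ht]

theorem pv_pos_pos (c : PvT) (v : Nat) (hv : v ∈ c.qn) (h0 : v ≠ 0) : 0 < pvPos c v := by
  obtain ⟨t, ht⟩ := c.hq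
  rcases Nat.eq_zero_or_pos (pvPos c v) with h | h
  · exfalso
    have h' : c.qn.idxOf v = 0 := h
    have hlt : c.qn.idxOf v < c.qn.length := List.idxOf_lt_length_of_mem hv
    have hg := List.getElem_idxOf hlt
    have hg0 : c.qn.getD (c.qn.idxOf v) 0 = v := by
      rw [List.getD_eq_getElem _ _ hlt, hg]
    rw [h', ht] at hg0
    simp at hg0
    exact h0 hg0.symm
  · exact h

theorem pv_chainF_zero_fuel (P : Nat → Nat) : ∀ f, pvChainF P f 0 = [0] := by
  intro f; cases f <;> simp [pvChainF]

theorem pv_pos_eq_zero (c : PvT) (u : Nat) (hu : u ∈ c.qn) (h : pvPos c u = 0) : u = 0 := by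
  by_contra h0
  have := pv_pos_pos c u hu h0
  omega

theorem pv_chainF_stable_aux (c : PvT) :
    ∀ p f g u, u ∈ c.qn → pvPos c u < p → pvPos c u ≤ f → pvPos c u ≤ g →
      pvChainF c.Pn f u = pvChainF c.Pn g u := by
  intro p
  induction p with
  | zero => intro f g u _ hp; omega
  | succ p ih =>
    intro f g u hu hp hf hg
    by_cases h0 : u = 0
    · subst h0; rw [pv_chainF_zero_fuel, pv_chainF_zero_fuel]
    · have hpos := pv_pos_pos c u hu h0
      obtain ⟨f', rfl⟩ : ∃ f', f = f' + 1 := ⟨f - 1, by omega⟩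
      obtain ⟨g', rfl⟩ : ∃ g', g = g' + 1 := ⟨g - 1, by omega⟩
      have hstep := c.step u hu h0
      have hlt : pvPos c (c.Pn u) < pvPos c u := hstep.2
      simp only [pvChainF, if_neg h0]
      congr 1
      exact ih f' g' (c.Pn u) hstep.1 (by omega) (by omega) (by omega)

theorem pv_chainF_stable (c : PvT) :
    ∀ f, ∀ u ∈ c.qn, pvPos c u ≤ f → pvChainF c.Pn f u = pvChainF c.Pn (pvPos c u) u := by
  intro f u hu hle
  exact pv_chainF_stable_aux c (pvPos c u + 1) f (pvPos c u) u hu (by omega) hle (le_refl _)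

theorem pv_nch_zero (c : PvT) : pvNch c 0 = [0] := by
  rw [pvNch, pv_pos_zero]; rfl

theorem pv_nch_cons (c : PvT) (v : Nat) (hv : v ∈ c.qn) (h0 : v ≠ 0) :
    pvNch c v = v :: pvNch c (c.Pn v) := by
  have hpos := pv_pos_pos c v hv h0
  have hstep := c.step v hv h0
  have hlt : pvPos c (c.Pn v) < pvPos c v := hstep.2
  obtain ⟨m, hm⟩ : ∃ m, pvPos c v = m + 1 := ⟨pvPos c v - 1, by omega⟩
  rw [pvNch, hm]
  simp only [pvChainF, if_neg h0]
  congr 1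
  rw [show pvChainF c.Pn m (c.Pn v) = pvChainF c.Pn (pvPos c (c.Pn v)) (c.Pn v) from
    pv_chainF_stable c m (c.Pn v) hstep.1 (by omega)]
  rfl

theorem pv_nch_head (c : PvT) (v : Nat) (hv : v ∈ c.qn) : ∃ t, pvNch c v = v :: t := by
  by_cases h0 : v = 0
  · subst h0; exact ⟨[], pv_nch_zero c⟩
  · exact ⟨_, pv_nch_cons c v hv h0⟩

-- every chain element lies in qn, no deeper than v
theorem pv_nch_mem (c : PvT) :
    ∀ p, ∀ v ∈ c.qn, pvPos c v < p →
      (∀ u ∈ pvNch c v, u ∈ c.qn ∧ pvPos c u ≤ pvPos c v) ∧ (pvNch c v).Nodup := by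
  intro p
  induction p with
  | zero => intro v _ hp; omega
  | succ p ih =>
    intro v hv hp
    by_cases h0 : v = 0
    · subst h0
      rw [pv_nch_zero]
      constructor
      · intro u hu
        rcases List.mem_singleton.mp hu with rfl
        exact ⟨hv, le_refl _⟩
      · exact List.nodup_singleton 0
    · have hstep := c.step v hv h0
      have hlt : pvPos c (c.Pn v) < pvPos c v := hstep.2
      have hih := ih (c.Pn v) hstep.1 (by omega)
      rw [pv_nch_cons c v hv h0]
      have hvnot : v ∉ pvNch c (c.Pn v) := by
        intro hmem
        have := (hih.1 v hmem).2
        omega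
      constructor
      · intro u hu
        rcases List.mem_cons.mp hu with rfl | hu'
        · exact ⟨hv, le_refl _⟩
        · have := hih.1 u hu'
          exact ⟨this.1, by omega⟩
      · exact List.nodup_cons.mpr ⟨hvnot, hih.2⟩

theorem pv_sum_ite_eq' (v : Nat) (g : Nat → Int) :
    ∀ (F : List Nat), F.Nodup →
      (F.map (fun x => if v = x then g x else 0)).sum = if v ∈ F then g v else 0 := by
  intro F
  induction F with
  | nil => simp
  | cons x t ih =>
    intro hnd
    have hx : x ∉ t := (List.nodup_cons.mp hnd).1
    have ht := (List.nodup_cons.mp hnd).2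
    simp only [List.map_cons, List.sum_cons, ih ht]
    by_cases hvx : v = x
    · subst hvx
      simp [hx]
    · simp [hvx, List.mem_cons]

theorem pv_sum_map_add {α : Type} (L : List α) (f g : α → Int) :
    (L.map (fun x => f x + g x)).sum = (L.map f).sum + (L.map g).sum := by
  induction L with
  | nil => simp
  | cons x t ih => simp [ih]; ring

theorem pv_sum_comm {α β : Type} (L1 : List α) (L2 : List β) (f : α → β → Int) :
    (L1.map (fun x => (L2.map (f x)).sum)).sum
      = (L2.map (fun y => (L1.map (fun x => f x y)).sum)).sum := by
  induction L1 with
  | nil => simp [List.map_const']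
  | cons x t ih =>
    simp only [List.map_cons, List.sum_cons, ih]
    rw [pv_sum_map_add L2 (f x) (fun y => (t.map (fun x => f x y)).sum)]

-- the chain-membership decomposition (counting each node once along each chain)
theorem pv_K (c : PvT) (A : Int) (v : Nat) :
    ∀ p, ∀ w ∈ c.qn, pvPos c w < p →
      (if v ∈ pvNch c w then A else 0)
        = (if v = w then A else 0)
          + (((c.qn.drop 1).filter (fun x => c.Pn x = v)).map
              (fun x => if x ∈ pvNch c w then A else 0)).sum := by
  have hF0 : ∀ x ∈ (c.qn.drop 1).filter (fun x => c.Pn x = v), x ≠ 0 := by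
    intro x hx
    obtain ⟨t, ht⟩ := c.hq
    have hxd : x ∈ c.qn.drop 1 := List.mem_of_mem_filter hx
    rw [ht] at hxd
    simp at hxd
    intro h0
    subst h0
    have : (0 : Nat) ∉ t := by
      have := c.nodup
      rw [ht] at this
      exact (List.nodup_cons.mp this).1
    exact this hxd
  intro p
  induction p with
  | zero => intro w _ hp; omega
  | succ p ih =>
    intro w hw hp
    by_cases h0 : w = 0
    · subst h0
      rw [pv_nch_zero]
      have hsum : (((c.qn.drop 1).filter (fun x => c.Pn x = v)).map
          (fun x => if x ∈ ([0] : List Nat) then A else 0)).sum = 0 := by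
        apply List.sum_eq_zero
        intro y hy
        obtain ⟨x, hx, rfl⟩ := List.mem_map.mp hy
        have := hF0 x hx
        simp [this]
      rw [hsum]
      simp [List.mem_singleton]
    · have hstep := c.step w hw h0
      have hlt : pvPos c (c.Pn w) < pvPos c w := hstep.2
      have hmm := pv_nch_mem c (pvPos c (c.Pn w) + 1) (c.Pn w) hstep.1 (by omega)
      have hwnot : w ∉ pvNch c (c.Pn w) := by
        intro hmem
        have := (hmm.1 w hmem).2
        omega
      rw [pv_nch_cons c w hw h0]
      have hmemsplit : ∀ u, (if u ∈ w :: pvNch c (c.Pn w) then A else 0)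
          = (if u = w then A else 0) + (if u ∈ pvNch c (c.Pn w) then A else 0) := by
        intro u
        by_cases huw : u = w
        · subst huw; simp [hwnot]
        · simp [List.mem_cons, huw]
      rw [hmemsplit v]
      have hmapsplit : (((c.qn.drop 1).filter (fun x => c.Pn x = v)).map
            (fun x => if x ∈ w :: pvNch c (c.Pn w) then A else 0)).sum
          = (((c.qn.drop 1).filter (fun x => c.Pn x = v)).map
              (fun x => if x = w then A else 0)).sum
            + (((c.qn.drop 1).filter (fun x => c.Pn x = v)).map
              (fun x => if x ∈ pvNch c (c.Pn w) then A else 0)).sum := by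
        rw [← pv_sum_map_add]
        apply congrArg
        apply List.map_congr_left
        intro x _
        exact hmemsplit x
      rw [hmapsplit]
      have hFnd : ((c.qn.drop 1).filter (fun x => c.Pn x = v)).Nodup :=
        List.Nodup.filter _ (List.Nodup.sublist (List.drop_sublist 1 c.qn) c.nodup)
      have hflip : (((c.qn.drop 1).filter (fun x => c.Pn x = v)).map
            (fun x => if x = w then A else 0)).sum
          = if w ∈ (c.qn.drop 1).filter (fun x => c.Pn x = v) then A else 0 := by
        rw [show (fun x => if x = w then A else 0) = (fun x => if w = x then A else 0) by
          funext x
          by_cases h : x = w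
          · subst h; simp
          · have h2 : ¬ (w = x) := fun h' => h h'.symm
            simp [h, h2]]
        exact pv_sum_ite_eq' w (fun _ => A) _ hFnd
      rw [hflip]
      have hwdrop : w ∈ c.qn.drop 1 := by
        obtain ⟨t, ht⟩ := c.hq
        rw [ht] at hw ⊢
        simp at hw ⊢
        rcases hw with h | h
        · exact absurd h h0
        · exact h
      have hwtail : w ∈ c.qn.tail := by rw [← List.drop_one]; exact hwdrop
      have hmemF : (w ∈ (c.qn.drop 1).filter (fun x => c.Pn x = v)) ↔ c.Pn w = v := by
        rw [List.mem_filter]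
        simp [hwdrop, hwtail]
      have hIH := ih (c.Pn w) hstep.1 (by omega)
      have hsw : (if w ∈ (c.qn.drop 1).filter (fun x => c.Pn x = v) then A else 0)
          = (if v = c.Pn w then A else 0) := by
        by_cases hpw : c.Pn w = v
        · rw [if_pos (hmemF.mpr hpw), if_pos hpw.symm]
        · rw [if_neg (fun h => hpw (hmemF.mp h)), if_neg (fun h => hpw h.symm)]
      rw [hsw, hIH]

def pvSub (c : PvT) (a : List Int) (v : Nat) : Int :=
  (c.qn.map (fun w => if v ∈ pvNch c w then a.getD w 0 else 0)).sum

-- subtree-sum recurrence: each ancestor-chain bucket equals its own value plus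
-- the buckets of its children
theorem pv_L1 (c : PvT) (a : List Int) :
    ∀ v ∈ c.qn, pvSub c a v
      = a.getD v 0 + (((c.qn.drop 1).filter (fun x => c.Pn x = v)).map (pvSub c a)).sum := by
  intro v hv
  have hrw : pvSub c a v
      = (c.qn.map (fun w => (if v = w then a.getD w 0 else 0)
          + (((c.qn.drop 1).filter (fun x => c.Pn x = v)).map
              (fun x => if x ∈ pvNch c w then a.getD w 0 else 0)).sum)).sum := by
    rw [pvSub]
    apply congrArg
    apply List.map_congr_left
    intro w hw
    exact pv_K c (a.getD w 0) v (pvPos c w + 1) w hw (by omega)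
  rw [hrw, pv_sum_map_add]
  congr 1
  · rw [pv_sum_ite_eq' v (fun w => a.getD w 0) c.qn c.nodup]
    simp [hv]
  · rw [pv_sum_comm c.qn ((c.qn.drop 1).filter (fun x => c.Pn x = v))
      (fun w x => if x ∈ pvNch c w then a.getD w 0 else 0)]
    rfl

-- A's transfer step at norm level
def pvPayN (n : Nat) (Pn : Nat → Nat) (st : List Int × Int) (v : Nat) : List Int × Int :=
  let s1 := st.1.set (Pn v) (st.1.getD (Pn v) 0 + st.1.getD v 0)
  (s1.set v 0, st.2 + |s1.getD v 0|)

-- the generic bottom-up transfer pass: over ANY children-before-parents ordering M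
-- of the non-root nodes Q, the pay fold zeroes Q, adds each subtree sum into its
-- parent slot, and accumulates Σ |subtree sum|
theorem pv_gen (n : Nat) (Pn : Nat → Nat) (sub : Nat → Int) (a0 : List Int) (Q : List Nat)
    (hQnd : Q.Nodup) (hlt : ∀ v ∈ Q, v < n ∧ Pn v < n ∧ Pn v ≠ v)
    (hsub : ∀ v ∈ Q, sub v = a0.getD v 0 + ((Q.filter (fun x => Pn x = v)).map sub).sum) :
    ∀ (M S : List Nat) (arr : List Int) (cnt : Int),
      (S ++ M).Perm Q →
      (S ++ M).Pairwise (fun y x => Pn x ≠ y) →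
      arr.length = n →
      (∀ x, x < n → arr.getD x 0
          = if x ∈ S then 0 else a0.getD x 0 + ((S.filter (fun cc => Pn cc = x)).map sub).sum) →
      cnt = (S.map (fun ch => |sub ch|)).sum →
      (M.foldl (pvPayN n Pn) (arr, cnt)).1.length = n ∧
      (∀ x, x < n → (M.foldl (pvPayN n Pn) (arr, cnt)).1.getD x 0
          = if x ∈ Q then 0 else a0.getD x 0 + ((Q.filter (fun cc => Pn cc = x)).map sub).sum) ∧
      (M.foldl (pvPayN n Pn) (arr, cnt)).2 = (Q.map (fun ch => |sub ch|)).sum := by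
  intro M
  induction M with
  | nil =>
    intro S arr cnt hperm hpw hlen hchar hcnt
    rw [List.append_nil] at hperm hpw
    refine ⟨hlen, ?_, ?_⟩
    · intro x hx
      rw [List.foldl_nil]
      simp only
      rw [hchar x hx]
      have hmemiff : (x ∈ S) ↔ (x ∈ Q) := hperm.mem_iff
      have hfil : (S.filter (fun cc => Pn cc = x)).Perm (Q.filter (fun cc => Pn cc = x)) :=
        hperm.filter _
      by_cases hxs : x ∈ S
      · rw [if_pos hxs, if_pos (hmemiff.mp hxs)]
      · rw [if_neg hxs, if_neg (fun h => hxs (hmemiff.mpr h))]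
        rw [(hfil.map sub).sum_eq]
    · rw [List.foldl_nil]
      simp only
      rw [hcnt, (hperm.map (fun ch => |sub ch|)).sum_eq]
  | cons v M' ih =>
    intro S arr cnt hperm hpw hlen hchar hcnt
    have hvQ : v ∈ Q := hperm.mem_iff.mp (by simp)
    obtain ⟨hvn, hpn, hpne⟩ := hlt v hvQ
    have hnd : (S ++ v :: M').Nodup := hperm.nodup_iff.mpr hQnd
    have hvS : v ∉ S := by
      intro h
      have := List.disjoint_of_nodup_append hnd
      exact this h (by simp)
    have hpw2 := (List.pairwise_append.mp hpw)
    have hPnvS : Pn v ∉ S := by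
      intro h
      exact hpw2.2.2 (Pn v) h v (by simp) rfl
    have hPnM : ∀ x ∈ M', Pn x ≠ v := by
      intro x hx
      exact (List.pairwise_cons.mp hpw2.2.1).1 x hx
    -- children of v are exactly the already-processed ones
    have hchild : ((S.filter (fun cc => Pn cc = v)).map sub).sum
        = ((Q.filter (fun cc => Pn cc = v)).map sub).sum := by
      have hSnd : (S.filter (fun cc => Pn cc = v)).Nodup :=
        List.Nodup.filter _ ((List.nodup_append.mp hnd).1)
      have hQfd : (Q.filter (fun cc => Pn cc = v)).Nodup := List.Nodup.filter _ hQnd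
      have hiff : ∀ x, x ∈ S.filter (fun cc => Pn cc = v) ↔ x ∈ Q.filter (fun cc => Pn cc = v) := by
        intro x
        rw [List.mem_filter, List.mem_filter]
        constructor
        · rintro ⟨h1, h2⟩
          exact ⟨hperm.mem_iff.mp (List.mem_append.mpr (Or.inl h1)), h2⟩
        · rintro ⟨h1, h2⟩
          have hx : x ∈ S ++ v :: M' := hperm.mem_iff.mpr h1
          rcases List.mem_append.mp hx with h | h
          · exact ⟨h, h2⟩
          · rcases List.mem_cons.mp h with rfl | h
            · exact absurd (of_decide_eq_true h2) hpne
            · exact absurd (of_decide_eq_true h2) (hPnM x h)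
      have : (S.filter (fun cc => Pn cc = v)).Perm (Q.filter (fun cc => Pn cc = v)) :=
        (List.perm_ext_iff_of_nodup hSnd hQfd).mpr hiff
      rw [(this.map sub).sum_eq]
    have harrv : arr.getD v 0 = sub v := by
      rw [hchar v hvn, if_neg hvS, hchild, ← hsub v hvQ]
    rw [List.foldl_cons]
    -- the pay step
    have hs1v : (arr.set (Pn v) (arr.getD (Pn v) 0 + arr.getD v 0)).getD v 0 = sub v := by
      rw [pv_getD_set_ne arr v (Pn v) _ 0 (fun h => hpne h.symm), harrv]
    apply ih (S ++ [v])
    · rw [List.append_assoc]; simpa using hperm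
    · rw [List.append_assoc]; simpa using hpw
    · simp [hlen]
    · intro x hx
      simp only [pvPayN]
      by_cases hxv : x = v
      · subst hxv
        rw [pv_getD_set_self _ x 0 0 (by simp [hlen]; omega)]
        rw [if_pos (by simp)]
      · rw [pv_getD_set_ne _ x v 0 0 hxv]
        by_cases hxp : x = Pn v
        · subst hxp
          rw [pv_getD_set_self arr (Pn v) _ 0 (by omega), harrv]
          have hxS' : Pn v ∉ S ++ [v] := by
            intro h
            rcases List.mem_append.mp h with h | h
            · exact hPnvS h
            · exact hpne (List.mem_singleton.mp h)
          rw [if_neg hxS', hchar (Pn v) hx, if_neg hPnvS]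
          rw [List.filter_append]
          have : List.filter (fun cc => decide (Pn cc = Pn v)) [v] = [v] := by simp
          rw [this, List.map_append, List.sum_append]
          simp
          ring
        · rw [pv_getD_set_ne arr x (Pn v) _ 0 hxp]
          have hxmem : (x ∈ S ++ [v]) ↔ (x ∈ S) := by simp [hxv]
          rw [hchar x hx, List.filter_append]
          have : List.filter (fun cc => decide (Pn cc = x)) [v] = [] := by
            have : ¬ (Pn v = x) := fun h => hxp h.symm
            simp [this]
          rw [this, List.append_nil]
          by_cases hxs : x ∈ S
          · rw [if_pos hxs, if_pos (hxmem.mpr hxs)]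
          · rw [if_neg hxs, if_neg (fun h => hxs (hxmem.mp h))]
    · simp only [pvPayN]
      rw [hs1v, hcnt, List.map_append, List.sum_append]
      simp

-- effect of adding aw at every index of a nodup list
theorem pv_addAll (n : Nat) (aw : Int) :
    ∀ (L : List Nat) (acc : List Int), L.Nodup → (∀ u ∈ L, u < n) → acc.length = n →
      (L.foldl (fun acc u => acc.set u (acc.getD u 0 + aw)) acc).length = n ∧
      ∀ ix, (L.foldl (fun acc u => acc.set u (acc.getD u 0 + aw)) acc).getD ix 0
          = acc.getD ix 0 + (if ix ∈ L then aw else 0) := by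
  intro L
  induction L with
  | nil => intro acc _ _ hl; exact ⟨hl, by intro ix; simp⟩
  | cons u t ih =>
    intro acc hnd hlt hl
    have hu : u ∉ t := (List.nodup_cons.mp hnd).1
    have hun : u < n := hlt u List.mem_cons_self
    have hrec := ih (acc.set u (acc.getD u 0 + aw)) (List.nodup_cons.mp hnd).2
      (fun y hy => hlt y (List.mem_cons_of_mem _ hy)) (by simpa using hl)
    rw [List.foldl_cons]
    refine ⟨hrec.1, ?_⟩
    intro ix
    rw [hrec.2 ix]
    by_cases hix : ix = u
    · subst hix
      rw [pv_getD_set_self acc ix _ 0 (by omega), if_neg hu, if_pos List.mem_cons_self]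
      ring
    · rw [pv_getD_set_ne acc ix u _ 0 hix]
      have : (ix ∈ u :: t) ↔ (ix ∈ t) := by simp [List.mem_cons, hix]
      by_cases hix2 : ix ∈ t
      · rw [if_pos hix2, if_pos (this.mpr hix2)]
      · rw [if_neg hix2, if_neg (fun h => hix2 (this.mp h))]

-- the climb loop walks exactly the ancestor chain (minus its head)
theorem pv_climb_eq (n : Nat) (parent order : List Int) (c : PvT)
    (hcq : c.qn = order.map (pvNorm n))
    (hcp : ∀ ix, c.Pn ix = pvNorm n (parent.getD ix 0))
    (hG1 : ∀ w ∈ order, pvNorm n w = 0 → w = 0)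
    (hG2 : ∀ w ∈ order, w ≠ 0 → parent.getD (pvNorm n w) 0 ∈ order)
    (aw : Int) :
    ∀ fuel, ∀ x ∈ order, ∀ acc, pvPos c (pvNorm n x) ≤ fuel →
      pvClimbLoop n parent aw fuel x acc
        = ((pvNch c (pvNorm n x)).drop 1).foldl
            (fun acc u => acc.set u (acc.getD u 0 + aw)) acc := by
  intro fuel
  induction fuel with
  | zero =>
    intro x hx acc hle
    have hmem : pvNorm n x ∈ c.qn := by
      rw [hcq]; exact List.mem_map_of_mem hx
    have hzero : pvNorm n x = 0 := pv_pos_eq_zero c _ hmem (by omega)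
    have hx0 : x = 0 := hG1 x hx hzero
    rw [hzero, pv_nch_zero]
    rfl
  | succ fuel ih =>
    intro x hx acc hle
    by_cases h0 : x = 0
    · subst h0
      rw [pvNorm_zero, pv_nch_zero]
      rfl
    · have hnz : pvNorm n x ≠ 0 := fun h => h0 (hG1 x hx h)
      have hmem : pvNorm n x ∈ c.qn := by
        rw [hcq]; exact List.mem_map_of_mem hx
      have hx' : parent.getD (pvNorm n x) 0 ∈ order := hG2 x hx h0
      have hpn : c.Pn (pvNorm n x) = pvNorm n (parent.getD (pvNorm n x) 0) := hcp _
      have hstep := c.step _ hmem hnz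
      have hplt : pvPos c (c.Pn (pvNorm n x)) < pvPos c (pvNorm n x) := hstep.2
      show (if x = 0 then acc else _) = _
      rw [if_neg h0]
      rw [ih (parent.getD (pvNorm n x) 0) hx' _ (by rw [← hpn]; omega)]
      rw [pv_nch_cons c (pvNorm n x) hmem hnz, hpn]
      obtain ⟨t, ht⟩ := pv_nch_head c (pvNorm n (parent.getD (pvNorm n x) 0))
        (by rw [← hpn]; exact hstep.1)
      rw [ht]
      rfl

theorem pv_getD_replicate {α : Type} (n ix : Nat) (d : α) :
    (List.replicate n d).getD ix d = d := by
  by_cases h : ix < n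
  · rw [List.getD_eq_getElem _ _ (by simpa using h)]
    simp
  · rw [List.getD_eq_default _ _ (by simpa using (le_of_not_gt h))]

theorem pv_norm_natCast (n ix : Nat) : pvNorm n (ix : Int) = ix := by
  unfold pvNorm
  rw [if_neg (by omega)]
  omega

theorem pv_any_ne (l : List Int) :
    (l.any (fun z => z ≠ 0) = true) ↔ ∃ ix, ix < l.length ∧ l.getD ix 0 ≠ 0 := by
  rw [List.any_eq_true]
  constructor
  · rintro ⟨x, hx, hpx⟩
    obtain ⟨i, hi, rfl⟩ := List.getElem_of_mem hx
    refine ⟨i, hi, ?_⟩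
    rw [List.getD_eq_getElem _ _ hi]
    simpa using hpx
  · rintro ⟨ix, hix, hne⟩
    refine ⟨l.getD ix 0, ?_, by simpa using hne⟩
    rw [List.getD_eq_getElem _ _ hix]
    exact List.getElem_mem hix

theorem pv_foldl_sum {α : Type} (f : α → Int) :
    ∀ (L : List α) (init : Int), L.foldl (fun t u => t + f u) init = init + (L.map f).sum := by
  intro L
  induction L with
  | nil => intro init; simp
  | cons x t ih => intro init; rw [List.foldl_cons, ih]; simp; ring

-- the whole accumulation loop of B: acc[ix] collects a[w] over every w whose
-- ancestor chain passes through ix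
theorem pv_accfold (n : Nat) (parent order : List Int) (c : PvT)
    (hcq : c.qn = order.map (pvNorm n))
    (hcp : ∀ ix, c.Pn ix = pvNorm n (parent.getD ix 0))
    (hG1 : ∀ w ∈ order, pvNorm n w = 0 → w = 0)
    (hG2 : ∀ w ∈ order, w ≠ 0 → parent.getD (pvNorm n w) 0 ∈ order)
    (hqlen : c.qn.length ≤ n) (hcn : c.n = n) (a0 : List Int) :
    ∀ (ws : List Int) (acc : List Int), (∀ w ∈ ws, w ∈ order) → acc.length = n →
      (ws.foldl (fun acc w => pvClimbLoop n parent (a0.getD (pvNorm n w) 0) n w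
          (acc.set (pvNorm n w) (acc.getD (pvNorm n w) 0 + a0.getD (pvNorm n w) 0))) acc).length = n ∧
      ∀ ix, (ws.foldl (fun acc w => pvClimbLoop n parent (a0.getD (pvNorm n w) 0) n w
          (acc.set (pvNorm n w) (acc.getD (pvNorm n w) 0 + a0.getD (pvNorm n w) 0))) acc).getD ix 0
        = acc.getD ix 0 + (ws.map (fun w =>
            if ix ∈ pvNch c (pvNorm n w) then a0.getD (pvNorm n w) 0 else 0)).sum := by
  intro ws
  induction ws with
  | nil => intro acc _ hl; exact ⟨hl, by intro ix; simp⟩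
  | cons w rest ih =>
    intro acc hws hl
    have hwo : w ∈ order := hws w List.mem_cons_self
    have hmem : pvNorm n w ∈ c.qn := by rw [hcq]; exact List.mem_map_of_mem hwo
    have hpos : pvPos c (pvNorm n w) ≤ n := by
      have : pvPos c (pvNorm n w) < c.qn.length := List.idxOf_lt_length_of_mem hmem
      omega
    have hchain := pv_climb_eq n parent order c hcq hcp hG1 hG2 (a0.getD (pvNorm n w) 0)
      n w hwo (acc.set (pvNorm n w) (acc.getD (pvNorm n w) 0 + a0.getD (pvNorm n w) 0)) hpos
    obtain ⟨t, ht⟩ := pv_nch_head c (pvNorm n w) hmem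
    have hcomb : pvClimbLoop n parent (a0.getD (pvNorm n w) 0) n w
        (acc.set (pvNorm n w) (acc.getD (pvNorm n w) 0 + a0.getD (pvNorm n w) 0))
      = (pvNch c (pvNorm n w)).foldl
          (fun acc u => acc.set u (acc.getD u 0 + a0.getD (pvNorm n w) 0)) acc := by
      rw [hchain, ht]
      rfl
    have hnm := pv_nch_mem c (pvPos c (pvNorm n w) + 1) (pvNorm n w) hmem (by omega)
    have haddall := pv_addAll n (a0.getD (pvNorm n w) 0) (pvNch c (pvNorm n w)) acc
      hnm.2 (fun u hu => hcn ▸ c.lt u (hnm.1 u hu).1) hl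
    rw [List.foldl_cons, hcomb]
    have hrec := ih _ (fun y hy => hws y (List.mem_cons_of_mem _ hy)) haddall.1
    refine ⟨hrec.1, ?_⟩
    intro ix
    rw [hrec.2 ix, haddall.2 ix]
    simp only [List.map_cons, List.sum_cons]
    ring

-- ===== VERDICT (by name: the statement is the Claim_ definition above) =====
theorem solution_spec : Claim_equal_solution := by
  intro a edges _ hpre
  obtain ⟨hne, hedge⟩ := hpre
  unfold Spec_solution
  simp only [solution, solution_alt, pvFindLevel]
  rw [pv_buildAdj_eq]
  set n := a.length with hn
  set nodes := edges.foldl (fun ls e => pvAppendAt n (pvAppendAt n ls e.1 e.2) e.2 e.1)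
    (List.replicate n ([] : List Int)) with hnodes
  have hnpos : 0 < n := List.length_pos_iff.mpr hne
  have hlen : nodes.length = n := by
    rw [hnodes, pv_adjFold_length]; simp
  have hadj : ∀ l ∈ nodes, ∀ x ∈ l, pvNorm n x < n := by
    rw [hnodes]
    refine pv_adjFold_inv n edges ?_ _ ?_
    · intro e he
      obtain ⟨h1, h2, h3, h4⟩ := hedge e he
      exact ⟨pvNorm_lt n e.1 h1 h2, pvNorm_lt n e.2 h3 h4⟩
    · intro l hl
      rw [List.eq_of_mem_replicate hl]
      intro x hx; cases hx
  have hnorm0 : pvNorm n 0 = 0 := pvNorm_zero n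
  -- couple A's BFS with B's BFS
  have hcouple := pv_bfs_couple nodes n hadj n
    ((List.replicate n false).set 0 true) (List.replicate n (0 : Int)) [0] 0
    (by simp) (by simp)
    (by
      intro v hv
      rcases List.mem_singleton.mp hv with rfl
      refine ⟨by rw [hnorm0]; exact hnpos, ?_⟩
      rw [hnorm0]
      exact pv_getD_set_self _ _ _ _ (by simpa using hnpos))
  rw [List.drop_zero,
    show ((([0] : List Int).drop 1).map
      (fun v => ((List.replicate n (0 : Int)).getD (pvNorm n v) 0, v))) = [] from rfl] at hcouple
  have hinit : ((List.replicate n false).set 0 true).map pvB2I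
      = (List.replicate n (0 : Int)).set 0 1 := by
    rw [List.map_set, List.map_replicate]; rfl
  rw [hlen, ← hinit, hcouple]
  -- structural invariants of the BFS result
  have hInv0 : pvInv n ((List.replicate n false).set 0 true) (List.replicate n (0 : Int)) [0] := by
    refine ⟨by simp, ?_, ?_, ?_⟩
    · intro ix hix
      by_cases h0 : ix = 0
      · subst h0
        rw [pv_getD_set_self _ 0 true false (by simpa using hnpos)]
        simp [hnorm0]
      · rw [pv_getD_set_ne _ ix 0 true false h0, pv_getD_replicate]
        simp [hnorm0, h0]
    · intro j hj; simp at hj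
    · intro v hv
      rcases List.mem_singleton.mp hv with rfl
      rw [hnorm0]; exact hnpos
  obtain ⟨⟨hnd, hmemiff, hpar, hbnd⟩, k, hk⟩ :=
    pv_bfs_inv nodes n hadj n ((List.replicate n false).set 0 true)
      (List.replicate n (0 : Int)) [0] 0 (by simp) (by simp) hInv0
  set bfs := pvBfsB nodes n n ((List.replicate n false).set 0 true)
    (List.replicate n (0 : Int)) [0] 0 with hbfs
  set ordF := bfs.2.2 with hordF
  set parF := bfs.2.1 with hparF
  set seenF := bfs.1 with hseenF
  have hk' : ordF = 0 :: k := by rw [hk]; rfl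
  set qn : List Nat := ordF.map (pvNorm n) with hqn
  set Pn : Nat → Nat := fun ix => pvNorm n (parF.getD ix 0) with hPn
  have hq0 : qn = 0 :: k.map (pvNorm n) := by
    rw [hqn, hk']
    simp [hnorm0]
  -- index facts
  have hidx : ∀ (j : Nat) (hj : j < qn.length), qn.idxOf qn[j] = j :=
    fun j hj => List.Nodup.idxOf_getElem hnd j hj
  have hqlen_eq : qn.length = ordF.length := by rw [hqn]; simp
  have hgetD_mem : ∀ (i : Nat), i < qn.length → qn.getD i 0 ∈ qn := by
    intro i hi
    rw [List.getD_eq_getElem _ _ hi]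
    exact List.getElem_mem hi
  have hidxD : ∀ (i : Nat), i < qn.length → qn.idxOf (qn.getD i 0) = i := by
    intro i hi
    rw [List.getD_eq_getElem _ _ hi]
    exact hidx i hi
  have hqD : ∀ (j : Nat), j < ordF.length → qn.getD j 0 = pvNorm n (ordF.getD j 0) := by
    intro j hjo
    have hj : j < qn.length := by rw [hqlen_eq]; exact hjo
    rw [List.getD_eq_getElem _ _ hj, List.getD_eq_getElem _ _ hjo]
    simp only [hqn, List.getElem_map]
  have hq00 : qn.getD 0 0 = 0 := by rw [hq0]; rfl
  have hOrd0 : ∀ (j : Nat), j < ordF.length → pvNorm n (ordF.getD j 0) = 0 → j = 0 := by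
    intro j hjo hz
    have hj : j < qn.length := by rw [hqlen_eq]; exact hjo
    have h0len : 0 < qn.length := by rw [hq0]; simp
    have e1 : qn.idxOf (qn.getD j 0) = j := hidxD j hj
    have e2 : qn.getD j 0 = 0 := by rw [hqD j hjo, hz]
    have e3 : qn.idxOf (qn.getD 0 0) = 0 := hidxD 0 h0len
    rw [e2] at e1
    rw [hq00] at e3
    omega
  have hstepF : ∀ v ∈ qn, v ≠ 0 → Pn v ∈ qn ∧ qn.idxOf (Pn v) < qn.idxOf v := by
    intro v hv hv0
    obtain ⟨j, hj, hje⟩ := List.getElem_of_mem hv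
    have hne2 : qn.getD j 0 = v := by rw [List.getD_eq_getElem _ _ hj, hje]
    have hjo : j < ordF.length := by rw [← hqlen_eq]; exact hj
    have hj0 : j ≠ 0 := by
      intro h0
      apply hv0
      rw [← hne2, h0, hq00]
    obtain ⟨i, hi, hieq⟩ := hpar (j - 1) (by rw [show j - 1 + 1 = j by omega]; exact hjo)
    rw [show j - 1 + 1 = j by omega] at hieq
    have hio : i < ordF.length := by omega
    have hiqn : i < qn.length := by rw [hqlen_eq]; exact hio
    have hPnv : Pn v = qn.getD i 0 := by
      show pvNorm n (parF.getD v 0) = qn.getD i 0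
      rw [← hne2, hqD j hjo, ← hieq, ← hqD i hio]
    refine ⟨hPnv ▸ hgetD_mem i hiqn, ?_⟩
    have e1 : qn.idxOf (Pn v) = i := by rw [hPnv]; exact hidxD i hiqn
    have e2 : qn.idxOf v = j := by rw [← hne2]; exact hidxD j hj
    omega
  have hOrdD0 : ordF.getD 0 0 = 0 := by rw [hk']; rfl
  have hG1 : ∀ w ∈ ordF, pvNorm n w = 0 → w = 0 := by
    intro w hw hz
    obtain ⟨j, hjo, hje⟩ := List.getElem_of_mem hw
    have hne2 : ordF.getD j 0 = w := by rw [List.getD_eq_getElem _ _ hjo, hje]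
    have hj0 : j = 0 := hOrd0 j hjo (by rw [hne2]; exact hz)
    rw [← hne2, hj0, hOrdD0]
  have hG2 : ∀ w ∈ ordF, w ≠ 0 → parF.getD (pvNorm n w) 0 ∈ ordF := by
    intro w hw hw0
    obtain ⟨j, hjo, hje⟩ := List.getElem_of_mem hw
    have hne2 : ordF.getD j 0 = w := by rw [List.getD_eq_getElem _ _ hjo, hje]
    have hj0 : j ≠ 0 := by
      intro h0
      apply hw0
      rw [← hne2, h0, hOrdD0]
    obtain ⟨i, hi, hieq⟩ := hpar (j - 1) (by rw [show j - 1 + 1 = j by omega]; exact hjo)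
    rw [show j - 1 + 1 = j by omega] at hieq
    have hio : i < ordF.length := by omega
    rw [← hne2, ← hieq, List.getD_eq_getElem _ _ hio]
    exact List.getElem_mem hio
  have hlt0 : ∀ v ∈ qn, v < n := by
    intro v hv
    obtain ⟨w, hw, rfl⟩ := List.mem_map.mp hv
    exact hbnd w hw
  set c : PvT := ⟨n, qn, Pn, ⟨k.map (pvNorm n), hq0⟩, hnd, hlt0, hstepF⟩ with hc
  set Q : List Nat := qn.drop 1 with hQ
  set sub : Nat → Int := pvSub c a with hsubdef
  have hQnd : Q.Nodup := List.Nodup.sublist (List.drop_sublist 1 qn) hnd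
  have h0Q : (0 : Nat) ∉ Q := by
    rw [hQ, hq0]
    intro h
    simp at h
    exact (List.nodup_cons.mp (hq0 ▸ hnd)).1 (by simpa using h)
  have hQsub : ∀ v ∈ Q, v ∈ qn := fun v hv => List.mem_of_mem_drop hv
  have hQne : ∀ v ∈ Q, v ≠ 0 := fun v hv h0 => h0Q (h0 ▸ hv)
  have hlt' : ∀ v ∈ Q, v < n ∧ Pn v < n ∧ Pn v ≠ v := by
    intro v hv
    have hvq := hQsub v hv
    have hv0 := hQne v hv
    have hst := hstepF v hvq hv0
    refine ⟨c.lt v hvq, c.lt _ hst.1, ?_⟩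
    intro h
    rw [h] at hst
    omega
  have hsub' : ∀ v ∈ Q, sub v = a.getD v 0 + ((Q.filter (fun x => Pn x = v)).map sub).sum := by
    intro v hv
    exact pv_L1 c a v (hQsub v hv)
  -- A's pay fold at norm level
  have hAfold : ((ordF.drop 1).map (fun v => (parF.getD (pvNorm n v) 0, v))).reverse.foldl
        (pvPayA n) (a, 0)
      = (Q.reverse).foldl (pvPayN n Pn) (a, 0) := by
    rw [← List.map_reverse, List.foldl_map]
    have hfn : (fun (st : List Int × Int) (v : Int) =>
        pvPayA n st (parF.getD (pvNorm n v) 0, v)) = (fun st v => pvPayN n Pn st (pvNorm n v)) := by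
      funext st v; rfl
    rw [hfn, ← List.foldl_map]
    rw [List.map_reverse, List.map_drop]
  have hPW : (Q.reverse).Pairwise (fun y x => Pn x ≠ y) := by
    rw [List.pairwise_reverse, List.pairwise_iff_getElem]
    intro i j hi hj hij
    have hQlen : Q.length = qn.length - 1 := by rw [hQ]; simp
    have h1i : 1 + i < qn.length := by omega
    have h1j : 1 + j < qn.length := by omega
    have hQi : Q[i]'hi = qn[1+i]'h1i := by
      simp only [hQ, List.getElem_drop]
    have hQj : Q[j]'hj = qn[1+j]'h1j := by
      simp only [hQ, List.getElem_drop]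
    have hidxi : qn.idxOf (Q[i]'hi) = 1 + i := by rw [hQi]; exact hidx _ h1i
    have hidxj : qn.idxOf (Q[j]'hj) = 1 + j := by rw [hQj]; exact hidx _ h1j
    have hmemQ : Q[i]'hi ∈ Q := List.getElem_mem hi
    have hst := hstepF (Q[i]'hi) (hQsub _ hmemQ) (hQne _ hmemQ)
    intro heq
    rw [heq, hidxj, hidxi] at hst
    omega
  have hGen := pv_gen n Pn sub a Q hQnd hlt' hsub' (Q.reverse) [] a 0
    (by simpa using (List.reverse_perm Q))
    (by simpa using hPW)
    rfl
    (by intro x hx; simp)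
    (by simp)
  -- B's accumulator
  have hqlen : qn.length ≤ n := by
    have h1 : qn.toFinset.card = qn.length := List.toFinset_card_of_nodup hnd
    have h2 : qn.toFinset ⊆ Finset.range n := by
      intro x hx
      rw [List.mem_toFinset] at hx
      exact Finset.mem_range.mpr (c.lt x hx)
    have := Finset.card_le_card h2
    simp at this
    omega
  have hAcc := pv_accfold n parF ordF c rfl (fun _ => rfl) hG1 hG2 hqlen rfl a
    ordF (List.replicate n (0 : Int)) (fun w h => h) (by simp)
  set accF := ordF.foldl (fun acc w =>
      pvClimbLoop n parF (a.getD (pvNorm n w) 0) n w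
        (acc.set (pvNorm n w) (acc.getD (pvNorm n w) 0 + a.getD (pvNorm n w) 0)))
    (List.replicate n (0 : Int)) with haccF
  have haccsub : ∀ ix, accF.getD ix 0 = sub ix := by
    intro ix
    rw [haccF, hAcc.2 ix, pv_getD_replicate]
    rw [hsubdef, pvSub]
    show 0 + _ = _
    rw [zero_add]
    show (ordF.map ((fun w => if ix ∈ pvNch c w then a.getD w 0 else 0) ∘ (pvNorm n))).sum = _
    rw [← List.map_map]
  -- final states
  set stF := (Q.reverse).foldl (pvPayN n Pn) (a, 0) with hstF
  obtain ⟨hstLen, hstChar, hstCnt⟩ := hGen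
  -- A's residue array at index 0 is exactly sub 0
  have h0qn : (0 : Nat) ∈ qn := by rw [hq0]; exact List.mem_cons_self
  have hst0 : stF.1.getD 0 0 = sub 0 := by
    rw [hstChar 0 hnpos, if_neg h0Q]
    rw [show ((Q.filter (fun cc => Pn cc = 0)).map sub).sum
        = ((Q.filter (fun x => Pn x = 0)).map sub).sum from rfl]
    exact (pv_L1 c a 0 h0qn).symm
  -- the two -1 conditions agree
  have hcond : (stF.1.any (fun z => z ≠ 0) = true)
      ↔ (accF.getD 0 0 ≠ 0 ∨ ((PySem.List.pyRange 0 (n : Int) 1).any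
          (fun x => !(seenF.getD (pvNorm n x) false) && decide (a.getD (pvNorm n x) 0 ≠ 0)) = true)) := by
    have hQsubqn : ∀ ix : Nat, ix ∉ qn → ix < n → stF.1.getD ix 0 = a.getD ix 0 := by
      intro ix hixq hixn
      have hnotQ : ix ∉ Q := fun h => hixq (hQsub ix h)
      have hfil : Q.filter (fun cc => Pn cc = ix) = [] := by
        rw [List.filter_eq_nil_iff]
        intro cc hcc
        have hccm : Pn cc ∈ qn := (hstepF cc (hQsub cc hcc) (hQne cc hcc)).1
        simp only [decide_eq_true_eq]
        intro heq
        exact hixq (heq ▸ hccm)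
      rw [hstChar ix hixn, if_neg hnotQ, hfil]
      simp
    constructor
    · rw [pv_any_ne]
      rintro ⟨ix, hixlen, hne2⟩
      have hixn : ix < n := by rw [hstLen] at hixlen; exact hixlen
      by_cases hixq : ix ∈ qn
      · rcases (by rw [hq0] at hixq; simpa using hixq :
            ix = 0 ∨ ix ∈ k.map (pvNorm n)) with h0 | hmem2
        · subst h0
          left
          rw [haccsub 0]
          rw [hst0] at hne2
          exact hne2
        · have hixQ : ix ∈ Q := by
            rw [hQ, hq0]
            simpa using hmem2
          exfalso
          apply hne2
          rw [hstChar ix hixn, if_pos hixQ]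
      · right
        rw [List.any_eq_true]
        refine ⟨(ix : Int), ?_, ?_⟩
        · rw [PySem.List.mem_pyRange_one]
          constructor
          · positivity
          · exact_mod_cast hixn
        · rw [pv_norm_natCast]
          have hseen0 : seenF.getD ix false = false := by
            cases h : seenF.getD ix false
            · rfl
            · exact absurd ((hmemiff ix hixn).mp h) hixq
          rw [hseen0]
          have heq2 : stF.1.getD ix 0 = a.getD ix 0 := hQsubqn ix hixq hixn
          rw [heq2] at hne2
          simp only [Bool.not_false, Bool.true_and, decide_eq_true_eq]
          exact hne2
    · rintro (h | h)
      · rw [pv_any_ne]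
        refine ⟨0, by rw [hstLen]; exact hnpos, ?_⟩
        rw [hst0, ← haccsub 0]
        exact h
      · rw [List.any_eq_true] at h
        obtain ⟨x, hxmem, hfx⟩ := h
        rw [PySem.List.mem_pyRange_one] at hxmem
        have hxnorm : pvNorm n x = x.toNat := by
          unfold pvNorm
          rw [if_neg (by omega)]
        have hixn : x.toNat < n := by omega
        rw [hxnorm] at hfx
        simp only [Bool.and_eq_true, Bool.not_eq_true', decide_eq_true_eq] at hfx
        have hixq : x.toNat ∉ qn := by
          intro hm
          rw [(hmemiff _ hixn).mpr hm] at hfx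
          exact absurd hfx.1 (by simp)
        rw [pv_any_ne]
        refine ⟨x.toNat, by rw [hstLen]; exact hixn, ?_⟩
        rw [hQsubqn x.toNat hixq hixn]
        exact hfx.2
  -- the two totals agree
  have htot : (PySem.List.slice ordF (some 1) none).foldl
        (fun t v => t + |accF.getD (pvNorm n v) 0|) 0 = stF.2 := by
    rw [PySem.List.slice_from_one, ← List.drop_one]
    have hfm : (ordF.drop 1).foldl (fun t v => t + |accF.getD (pvNorm n v) 0|) 0
        = ((ordF.drop 1).map (pvNorm n)).foldl (fun t u => t + |accF.getD u 0|) 0 := by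
      rw [List.foldl_map]
    rw [hfm, List.map_drop, pv_foldl_sum, zero_add, hstCnt]
    apply congrArg
    apply List.map_congr_left
    intro u _
    rw [haccsub u]
  rw [hAfold, htot]
  exact if_congr hcond rfl rfl
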